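-- pv_equiv track=rewrite | github.com/SABERTR0N/Data-Structure-And-Algorithm | FInd_Dups.py | Find_Dups
-- ===== SOURCE A (Python) =====
-- def Find_Dups(arr):
--     count = 0
--     dup = 0
--     for i in range(len(arr)):
--         for j in range(i+1, len(arr)):
--             if arr[i] == arr[j]:
--                 dup = arr[i]
--                 count += 1
--     return dup, count
-- ===== SOURCE B (Python) =====
-- def Find_Dups(arr):
--     # One pass: info maps value -> (occurrences so far, last index seen).
--     # count grows by the multiplicity seen so far (sum = number of equal pairs);
--     # dup is the value whose previous-occurrence index is the largest such index.
--     info = {}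
--     count = 0
--     best = -1
--     dup = 0
--     for i, x in enumerate(arr):
--         c, p = info.get(x, (0, -1))
--         count += c
--         if c and p > best:
--             best = p
--             dup = x
--         info[x] = (c + 1, i)
--     return dup, count
-- ===== Notes on version B (the rewrite author's own statement) =====
-- stated objective: faster
-- what changed: Replaces A's nested O(n^2) pairwise comparison loops by a single pass that keeps, per value, its multiplicity so far and its last index in a dict: count grows by the multiplicity (summing to the number of equal pairs) and dup is the value whose previous-occurrence index is the largest index having a later equal, exactly A's final dup.
import Mathlib
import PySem

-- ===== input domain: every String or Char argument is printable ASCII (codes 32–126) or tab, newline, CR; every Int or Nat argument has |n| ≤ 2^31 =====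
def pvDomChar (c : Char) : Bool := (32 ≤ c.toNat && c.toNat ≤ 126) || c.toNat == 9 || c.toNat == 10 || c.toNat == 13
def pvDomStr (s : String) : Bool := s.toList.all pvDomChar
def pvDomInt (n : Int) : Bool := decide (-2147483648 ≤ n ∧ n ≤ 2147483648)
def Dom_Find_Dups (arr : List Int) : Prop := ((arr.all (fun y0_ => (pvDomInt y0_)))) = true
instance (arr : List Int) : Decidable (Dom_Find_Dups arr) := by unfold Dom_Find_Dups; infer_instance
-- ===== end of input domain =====

-- B replaces A's O(n^2) pairwise double loop by one pass with a dict of (multiplicity, last index); return value only.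

-- ===== PORT A =====
-- inner loop over j in range(i+1, len(arr)); state s = (dup, count)
def FD_body (arr : List Int) (s : Int × Int) (i : Int) : Int × Int :=
  (PySem.List.pyRange (i + 1) (arr.length : Int) 1).foldl
    (fun s j =>
      if PySem.List.pyGetD arr i 0 = PySem.List.pyGetD arr j 0 then
        (PySem.List.pyGetD arr i 0, s.2 + 1)
      else s) s

def Find_Dups (arr : List Int) : Int × Int :=
  let st := (PySem.List.pyRange 0 (arr.length : Int) 1).foldl (FD_body arr) (0, 0)
  (st.1, st.2)

-- ===== PORT B =====
-- loop body; state = (info, count, best, dup), element = (i, x) from enumerate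
def FDalt_body (st : PySem.Dict Int (Int × Int) × Int × Int × Int) (ix : Int × Int) :
    PySem.Dict Int (Int × Int) × Int × Int × Int :=
  let info := st.1
  let count := st.2.1
  let best := st.2.2.1
  let dup := st.2.2.2
  let i := ix.1
  let x := ix.2
  let c := (info.getD x (0, -1)).1
  let p := (info.getD x (0, -1)).2
  let count := count + c
  let bd := if c ≠ 0 ∧ p > best then (p, x) else (best, dup)
  (info.insert x (c + 1, i), count, bd.1, bd.2)

def Find_Dups_alt (arr : List Int) : Int × Int :=
  let st := (PySem.List.enumerate arr 0).foldl FDalt_body (PySem.Dict.empty, 0, -1, 0)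
  (st.2.2.2, st.2.1)

-- ===== PRECONDITION & SPEC =====
def Spec_Find_Dups (arr : List Int) (out : Int × Int) : Prop := out = Find_Dups_alt arr
instance (arr : List Int) (out : Int × Int) : Decidable (Spec_Find_Dups arr out) := by unfold Spec_Find_Dups; infer_instance

-- ===== CLAIM (what is proved, stated in full; the proofs are below) =====
def Claim_equal_Find_Dups : Prop := ∀ (arr : List Int), Dom_Find_Dups arr → Spec_Find_Dups arr (Find_Dups arr)

-- ===== LEMMAS AND PROOFS =====

-- number of equal pairs (i < j), counted at the earlier element
def countSpec : List Int → Int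
  | [] => 0
  | x :: r => (r.count x : Int) + countSpec r

-- does the list contain an equal pair?
def hasDup : List Int → Bool
  | [] => false
  | x :: r => r.contains x || hasDup r

-- A's dup accumulator: process positions in order, set to x when a later equal exists
def dupD : List Int → Int → Int
  | [], d => d
  | x :: r, d => dupD r (if r.contains x then x else d)

-- last index of x in the list, -1 if absent
def lastIdx (x : Int) : List Int → Int
  | [] => -1
  | y :: r => if r.contains x then 1 + lastIdx x r else if y = x then 0 else -1

-- largest index that has a later equal, -1 if none
def bestIdx : List Int → Int
  | [] => -1
  | x :: r => if hasDup r then 1 + bestIdx r else if r.contains x then 0 else -1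

theorem innerFold (t : List Int) (v : Int) : ∀ s : Int × Int,
    t.foldl (fun s y => if v = y then (v, s.2 + 1) else s) s
      = ((if t.contains v then v else s.1), s.2 + (t.count v : Int)) := by
  induction t with
  | nil => intro s; simp
  | cons y t ih =>
    intro s
    simp only [List.foldl_cons, ih, List.contains_cons, List.count_cons]
    by_cases h : v = y
    · subst h; simp; ring
    · have : ¬ (y == v) := by simp [beq_iff_eq]; exact fun e => h e.symm
      simp [h, this]

theorem body_eval (arr : List Int) (s : Int × Int) (i : Int) (h : 0 ≤ i) :
    FD_body arr s i =
      ((if (arr.drop (i + 1).toNat).contains (PySem.List.pyGetD arr i 0)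
          then PySem.List.pyGetD arr i 0 else s.1),
        s.2 + ((arr.drop (i + 1).toNat).count (PySem.List.pyGetD arr i 0) : Int)) := by
  unfold FD_body
  rw [PySem.List.foldl_pyRange_pyGetD' (xs := arr) (d := 0)
      (f := fun s y => if PySem.List.pyGetD arr i 0 = y then (PySem.List.pyGetD arr i 0, s.2 + 1) else s)
      (init := s) (by omega)]
  exact innerFold _ _ s

theorem body_shift (x : Int) (r : List Int) (k : Nat) (s : Int × Int) :
    FD_body (x :: r) s (1 + (k : Int)) = FD_body r s (k : Int) := by
  rw [body_eval _ _ _ (by omega), body_eval _ _ _ (by omega)]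
  have h1 : PySem.List.pyGetD (x :: r) (1 + (k : Int)) 0 = PySem.List.pyGetD r (k : Int) 0 := by
    have he : (1 + (k : Int)) = ((k + 1 : Nat) : Int) := by push_cast; ring
    rw [he, PySem.List.pyGetD_natCast, PySem.List.pyGetD_natCast]
    simp
  have h2 : (1 + (k : Int) + 1).toNat = ((k : Int) + 1).toNat + 1 := by omega
  rw [h1, h2, List.drop_succ_cons]

theorem shift_fold (x : Int) (r : List Int) (s : Int × Int) :
    (PySem.List.pyRange 1 ((x :: r).length : Int) 1).foldl (FD_body (x :: r)) s
      = (PySem.List.pyRange 0 ((r.length : Int)) 1).foldl (FD_body r) s := by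
  rw [PySem.List.pyRange_one, PySem.List.pyRange_one]
  have h1 : ((((x :: r).length : Int)) - 1).toNat = r.length := by
    simp only [List.length_cons]; push_cast; omega
  have h2 : (((r.length : Int)) - 0).toNat = r.length := by omega
  rw [h1, h2, List.foldl_map, List.foldl_map]
  congr 1
  funext s k
  have hb := body_shift x r k s
  simpa using hb

theorem A_outer : ∀ (arr : List Int) (s : Int × Int),
    (PySem.List.pyRange 0 (arr.length : Int) 1).foldl (FD_body arr) s
      = (dupD arr s.1, s.2 + countSpec arr) := by
  intro arr
  induction arr with
  | nil =>
    intro s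
    rw [PySem.List.pyRange_one_eq_nil (by simp)]
    simp [dupD, countSpec]
  | cons x r ih =>
    intro s
    have hlen : (0 : Int) < ((x :: r).length : Int) := by
      simp only [List.length_cons]; push_cast; omega
    rw [PySem.List.pyRange_one_cons hlen, List.foldl_cons]
    have h0 : FD_body (x :: r) s 0 = ((if r.contains x then x else s.1), s.2 + (r.count x : Int)) := by
      rw [body_eval _ _ _ le_rfl]
      norm_num [PySem.List.pyGetD_zero_cons]
    rw [h0]
    rw [show (0:Int)+1 = 1 by norm_num]
    rw [shift_fold, ih]
    by_cases hc : x ∈ r <;>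
      simp [dupD, countSpec, hc] <;> ring

theorem A_eq (arr : List Int) : Find_Dups arr = (dupD arr 0, countSpec arr) := by
  unfold Find_Dups
  rw [A_outer]
  simp

theorem hasDup_snoc (p : List Int) (x : Int) :
    hasDup (p ++ [x]) = (hasDup p || p.contains x) := by
  induction p with
  | nil => simp [hasDup]
  | cons y r ih =>
    simp only [List.cons_append, hasDup, ih, List.contains_eq_mem, List.mem_append,
      List.mem_cons]
    by_cases h1 : y ∈ r <;> by_cases h2 : hasDup r <;> by_cases h3 : x ∈ r <;>
      by_cases h4 : y = x <;> simp [h1, h2, h3, h4]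
    all_goals tauto

theorem countSpec_snoc (p : List Int) (x : Int) :
    countSpec (p ++ [x]) = countSpec p + (p.count x : Int) := by
  induction p with
  | nil => simp [countSpec]
  | cons y r ih =>
    simp only [List.cons_append, countSpec, ih, List.count_append, List.count_cons,
      List.count_nil]
    by_cases h : x = y
    · subst h; simp; ring
    · have h1 : ¬ (y == x) := by simp [beq_iff_eq]; exact fun e => h e.symm
      have h2 : ¬ (x == y) := by simp [beq_iff_eq]; exact h
      simp [h1, h2]; ring

theorem dupD_of_hasDup (q : List Int) (h : hasDup q = true) (d d' : Int) :
    dupD q d = dupD q d' := by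
  induction q generalizing d d' with
  | nil => simp [hasDup] at h
  | cons y r ih =>
    simp only [hasDup, Bool.or_eq_true] at h
    by_cases hc : r.contains y
    · have hy : y ∈ r := by simpa using hc
      simp [dupD, hc, hy]
    · rcases h with h | h
      · exact absurd h hc
      · simp only [dupD, hc, if_neg, Bool.false_eq_true, not_false_iff]
        exact ih h _ _

theorem dupD_of_not_hasDup (q : List Int) (h : hasDup q = false) (d : Int) :
    dupD q d = d := by
  induction q generalizing d with
  | nil => rfl
  | cons y r ih =>
    simp only [hasDup, Bool.or_eq_false_iff] at h
    simp only [dupD, h.1, Bool.false_eq_true, if_neg, not_false_iff]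
    exact ih h.2 _

theorem bestIdx_of_not_hasDup (q : List Int) (h : hasDup q = false) : bestIdx q = -1 := by
  induction q with
  | nil => rfl
  | cons y r ih =>
    simp only [hasDup, Bool.or_eq_false_iff] at h
    have hy : y ∉ r := by simpa using h.1
    simp [bestIdx, h.2, hy]

theorem bestIdx_nonneg (q : List Int) (h : hasDup q = true) : 0 ≤ bestIdx q := by
  induction q with
  | nil => simp [hasDup] at h
  | cons y r ih =>
    simp only [hasDup, Bool.or_eq_true] at h
    by_cases hd : hasDup r
    · have := ih hd; simp [bestIdx, hd]; omega
    · rcases h with h | h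
      · have hy : y ∈ r := by simpa using h
        simp [bestIdx, hd, hy]
      · exact absurd h hd

theorem lastIdx_nonneg (x : Int) (p : List Int) (h : x ∈ p) : 0 ≤ lastIdx x p := by
  induction p with
  | nil => simp at h
  | cons y r ih =>
    by_cases hc : x ∈ r
    · have h1 := ih hc
      simp [lastIdx, hc]; omega
    · rcases List.mem_cons.mp h with h1 | h1
      · subst h1; simp [lastIdx, hc]
      · exact absurd h1 hc

theorem lastIdx_snoc_self (x : Int) (p : List Int) :
    lastIdx x (p ++ [x]) = (p.length : Int) := by
  induction p with
  | nil => simp [lastIdx]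
  | cons y r ih =>
    have hc : (r ++ [x]).contains x = true := by simp
    simp [lastIdx, hc, ih]
    ring

theorem lastIdx_snoc_ne (x z : Int) (p : List Int) (h : z ≠ x) :
    lastIdx x (p ++ [z]) = lastIdx x p := by
  induction p with
  | nil => simp [lastIdx, h, Ne.symm h]
  | cons y r ih =>
    have hc : (r ++ [z]).contains x = r.contains x := by
      simp [List.contains_eq_mem]
      intro hx; exact absurd hx.symm h
    simp only [List.cons_append, lastIdx, hc, ih]

theorem bestIdx_snoc (p : List Int) (x : Int) :
    bestIdx (p ++ [x]) =
      if x ∈ p ∧ lastIdx x p > bestIdx p then lastIdx x p else bestIdx p := by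
  induction p with
  | nil => simp [bestIdx, lastIdx, hasDup]
  | cons y q ih =>
    by_cases hx : x ∈ q <;> by_cases hdq : hasDup q = true
    · have hb := bestIdx_nonneg q hdq
      have hl := lastIdx_nonneg x q hx
      simp only [List.cons_append, bestIdx, lastIdx, hasDup_snoc, ih, List.mem_cons]
      simp [hx, hdq]
      by_cases hyq : y ∈ q <;> by_cases hxy : y = x <;> (try simp [hyq, hxy]) <;>
        (try split_ifs) <;> omega
    · have hb := bestIdx_of_not_hasDup q (by simpa using hdq)
      have hl := lastIdx_nonneg x q hx
      simp only [List.cons_append, bestIdx, lastIdx, hasDup_snoc, ih, List.mem_cons]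
      simp [hx, hdq, hb]
      by_cases hyq : y ∈ q <;> by_cases hxy : y = x <;> (try simp [hyq, hxy]) <;>
        (try split_ifs) <;> omega
    · have hb := bestIdx_nonneg q hdq
      simp only [List.cons_append, bestIdx, lastIdx, hasDup_snoc, ih, List.mem_cons]
      simp [hx, hdq]
      by_cases hyq : y ∈ q <;> by_cases hxy : y = x <;> (try simp [hyq, hxy]) <;>
        (try split_ifs) <;> omega
    · have hb := bestIdx_of_not_hasDup q (by simpa using hdq)
      simp only [List.cons_append, bestIdx, lastIdx, hasDup_snoc, ih, List.mem_cons]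
      simp [hx, hdq, hb]
      by_cases hyq : y ∈ q <;> by_cases hxy : y = x <;> (try simp [hyq, hxy]) <;>
        (try split_ifs) <;> omega

theorem dupD_snoc (p : List Int) (x : Int) (d : Int) :
    dupD (p ++ [x]) d =
      if x ∈ p ∧ lastIdx x p > bestIdx p then x else dupD p d := by
  induction p generalizing d with
  | nil => simp [dupD, lastIdx]
  | cons y q ih =>
    simp only [List.cons_append, dupD, ih, List.mem_cons]
    by_cases hdq : hasDup q = true
    · have hb := bestIdx_nonneg q hdq
      have e1 : ∀ d1 d2 : Int, dupD q d1 = dupD q d2 := dupD_of_hasDup q hdq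
      by_cases hx : x ∈ q
      · have hl := lastIdx_nonneg x q hx
        simp only [lastIdx, bestIdx]
        simp [hx, hdq]
        split_ifs <;> first | rfl | omega | apply e1
      · simp only [lastIdx, bestIdx]
        by_cases hxy : y = x <;> simp [hx, hdq, hxy] <;>
          (try split_ifs) <;> first | rfl | omega | apply e1
    · have hdq' : hasDup q = false := by simpa using hdq
      have hb := bestIdx_of_not_hasDup q hdq'
      have e2 : ∀ d' : Int, dupD q d' = d' := dupD_of_not_hasDup q hdq'
      simp only [e2, lastIdx, bestIdx]
      by_cases hx : x ∈ q
      · have hl := lastIdx_nonneg x q hx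
        by_cases hxy : y = x <;> by_cases hyq : y ∈ q <;>
          (try simp [hx, hxy, hyq, hdq]) <;> (try split_ifs) <;> first | rfl | omega
      · by_cases hxy : y = x <;> by_cases hyq : y ∈ q <;>
          (try simp [hx, hxy, hyq, hdq]) <;> (try split_ifs) <;> first | rfl | omega

theorem B_loop : ∀ (t p : List Int) (info : PySem.Dict Int (Int × Int)),
    (∀ y : Int, info.getD y (0, -1) = ((p.count y : Int), lastIdx y p)) →
    ((PySem.List.enumerate t (p.length : Int)).foldl FDalt_body
        (info, countSpec p, bestIdx p, dupD p 0)).2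
      = (countSpec (p ++ t), bestIdx (p ++ t), dupD (p ++ t) 0) := by
  intro t
  induction t with
  | nil =>
    intro p info hinfo
    simp [PySem.List.enumerate]
  | cons x t ih =>
    intro p info hinfo
    rw [PySem.List.enumerate_cons, List.foldl_cons]
    have hx := hinfo x
    have hstep : FDalt_body (info, countSpec p, bestIdx p, dupD p 0) ((p.length : Int), x)
        = (info.insert x ((p.count x : Int) + 1, (p.length : Int)),
            countSpec (p ++ [x]), bestIdx (p ++ [x]), dupD (p ++ [x]) 0) := by
      simp only [FDalt_body, hx]
      rw [countSpec_snoc, bestIdx_snoc, dupD_snoc]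
      have hcond : ((p.count x : Int) ≠ 0 ∧ lastIdx x p > bestIdx p)
          ↔ (x ∈ p ∧ lastIdx x p > bestIdx p) := by
        constructor
        · rintro ⟨h1, h2⟩
          refine ⟨?_, h2⟩
          rw [← List.count_pos_iff]
          omega
        · rintro ⟨h1, h2⟩
          refine ⟨?_, h2⟩
          have := List.count_pos_iff.mpr h1
          omega
      by_cases hc : x ∈ p ∧ lastIdx x p > bestIdx p
      · rw [if_pos (hcond.mpr hc), if_pos hc, if_pos hc]
      · rw [if_neg (fun h => hc (hcond.mp h)), if_neg hc, if_neg hc]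
    rw [hstep]
    have hinfo' : ∀ y : Int,
        (info.insert x ((p.count x : Int) + 1, (p.length : Int))).getD y (0, -1)
          = (((p ++ [x]).count y : Int), lastIdx y (p ++ [x])) := by
      intro y
      rw [PySem.Dict.getD_insert]
      by_cases hy : y = x
      · subst hy
        rw [if_pos rfl, lastIdx_snoc_self]
        simp [List.count_append]
      · rw [if_neg hy, hinfo y, lastIdx_snoc_ne y x p (fun h => hy h.symm)]
        have : (p ++ [x]).count y = p.count y := by
          simp only [List.count_append]
          have hxy : List.count y [x] = 0 := by
            simp [List.count_singleton, beq_iff_eq]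
            exact fun h => hy h.symm
          omega
        rw [this]
    have hlen : ((p.length : Int) + 1) = (((p ++ [x]).length : Nat) : Int) := by
      simp
    rw [hlen, ih (p ++ [x]) _ hinfo']
    rw [List.append_assoc, List.singleton_append]

theorem B_eq (arr : List Int) : Find_Dups_alt arr = (dupD arr 0, countSpec arr) := by
  unfold Find_Dups_alt
  have hinfo : ∀ y : Int, (PySem.Dict.empty : PySem.Dict Int (Int × Int)).getD y (0, -1)
      = ((([] : List Int).count y : Int), lastIdx y ([] : List Int)) := by
    intro y; simp [PySem.Dict.getD_empty, lastIdx]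
  have h := B_loop arr [] PySem.Dict.empty hinfo
  simp only [List.length_nil, Nat.cast_zero, List.nil_append] at h
  have h0 : countSpec ([] : List Int) = 0 := rfl
  have h1 : bestIdx ([] : List Int) = -1 := rfl
  have h2 : dupD ([] : List Int) 0 = 0 := rfl
  rw [h0, h1, h2] at h
  rw [Prod.ext_iff] at h
  obtain ⟨ha, hb⟩ := h
  rw [Prod.ext_iff] at hb
  simp only []
  cases hh : (PySem.List.enumerate arr 0).foldl FDalt_body (PySem.Dict.empty, 0, -1, 0)
  simp_all

-- ===== VERDICT (by name: the statement is the Claim_ definition above) =====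
theorem Find_Dups_spec : Claim_equal_Find_Dups := by
  intro arr _
  unfold Spec_Find_Dups
  rw [A_eq, B_eq]
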